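-- pv_equiv track=rewrite | github.com/pacpltradingdesk-dotcom/bio-bitumen-consultant-portal | pages/60_📧_Vendor_Emails.py | find_vendor_block
-- ===== SOURCE A (Python) =====
-- def find_vendor_block(md_content: str, vendor_name: str) -> str:
--     """Extract the email block for a specific vendor from the MD file."""
--     if not md_content:
--         return ""
--     # Try to find vendor section by name
--     short = vendor_name.replace(" (India Agent)", "").replace(" INDIA", "").split("(")[0].strip()
--     short_upper = short.upper()
--
--     # Find heading lines that contain the vendor name
--     lines = md_content.split("\n")
--     start_idx = None
--     for i, line in enumerate(lines):
--         if short_upper in line.upper() and line.startswith("###"):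
--             start_idx = i
--             break
--
--     if start_idx is None:
--         # Fallback: search for vendor name anywhere in a heading
--         for i, line in enumerate(lines):
--             parts = vendor_name.upper().split()
--             if len(parts) >= 2 and parts[0] in line.upper() and line.startswith("#"):
--                 start_idx = i
--                 break
--
--     if start_idx is None:
--         return ""
--
--     # Collect until next ### heading or end of vendor blocks
--     block_lines = []
--     for line in lines[start_idx:]:
--         if block_lines and line.startswith("### Vendor") and len(block_lines) > 2:
--             break
--         if block_lines and line.startswith("## ") and len(block_lines) > 2:
--             break
--         block_lines.append(line)
--
--     return "\n".join(block_lines)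
-- ===== SOURCE B (Python) =====
-- def find_vendor_block(md_content: str, vendor_name: str) -> str:
--     """Extract the email block for a specific vendor from the MD file."""
--     if not md_content:
--         return ""
--     short_upper = (vendor_name.replace(" (India Agent)", "")
--                    .replace(" INDIA", "").split("(")[0].strip().upper())
--     parts = vendor_name.upper().split()
--     first_word = parts[0] if len(parts) >= 2 else None
--     lines = md_content.split("\n")
--     # one pass: record both candidate start indices and every block-boundary index
--     primary = fallback = None
--     boundaries = []
--     for i, line in enumerate(lines):
--         up = line.upper()
--         if primary is None and line.startswith("###") and short_upper in up:
--             primary = i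
--         if fallback is None and first_word is not None and line.startswith("#") and first_word in up:
--             fallback = i
--         if line.startswith("### Vendor") or line.startswith("## "):
--             boundaries.append(i)
--     start = primary if primary is not None else fallback
--     if start is None:
--         return ""
--     end = len(lines)
--     for b in boundaries:
--         if b >= start + 3:
--             end = b
--             break
--     return "\n".join(lines[start:end])
-- ===== Notes on version B (the rewrite author's own statement) =====
-- stated objective: alternative
-- what changed: A's three staged scans (heading search, fallback heading search, accumulate-and-break collection) are replaced by ONE pass over the lines that records both candidate start indices and the list of all boundary-line indices, after which the block end is picked from that precomputed boundary index list and the block returned as a slice.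
import Mathlib
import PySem

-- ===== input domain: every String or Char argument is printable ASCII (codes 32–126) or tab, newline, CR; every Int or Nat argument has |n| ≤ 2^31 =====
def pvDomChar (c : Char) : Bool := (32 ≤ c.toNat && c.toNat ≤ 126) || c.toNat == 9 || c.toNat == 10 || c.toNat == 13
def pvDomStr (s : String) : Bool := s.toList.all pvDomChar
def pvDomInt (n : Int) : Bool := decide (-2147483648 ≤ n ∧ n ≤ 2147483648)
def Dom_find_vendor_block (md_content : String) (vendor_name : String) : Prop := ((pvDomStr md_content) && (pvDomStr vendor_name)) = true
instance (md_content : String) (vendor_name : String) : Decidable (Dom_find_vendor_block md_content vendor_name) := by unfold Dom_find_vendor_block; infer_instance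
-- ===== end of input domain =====

-- B replaces A's three staged scans by ONE pass recording both candidate start indices and all boundary
-- indices, then picks the end from the precomputed boundary list and slices; objective: alternative (same cost).

-- ===== PORT A =====
-- first search loop: first i with short_upper in line.upper() and line.startswith("###")
def pvFindA1 (short_upper : String) : List String → Option Nat
  | [] => none
  | l :: rest =>
    if PySem.Str.isIn short_upper (PySem.Str.upper l) && PySem.Str.startswith l "###" then some 0
    else (pvFindA1 short_upper rest).map (· + 1)

-- fallback search loop: parts recomputed each iteration, as in A
def pvFindA2 (vendor_name : String) : List String → Option Nat
  | [] => none
  | l :: rest =>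
    let parts := PySem.Str.split₀ (PySem.Str.upper vendor_name)
    if decide (2 ≤ parts.length) && PySem.Str.isIn (parts.headD "") (PySem.Str.upper l) && PySem.Str.startswith l "#" then some 0
    else (pvFindA2 vendor_name rest).map (· + 1)

-- collection loop with stateful break
def pvCollectA (acc : List String) : List String → List String
  | [] => acc
  | l :: rest =>
    if !acc.isEmpty && PySem.Str.startswith l "### Vendor" && decide (2 < acc.length) then acc
    else if !acc.isEmpty && PySem.Str.startswith l "## " && decide (2 < acc.length) then acc
    else pvCollectA (acc ++ [l]) rest

def find_vendor_block (md_content : String) (vendor_name : String) : String :=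
  if md_content == "" then ""
  else
    let short := PySem.Str.strip (((PySem.Str.split? (PySem.Str.replace (PySem.Str.replace vendor_name " (India Agent)" "") " INDIA" "") "(").getD []).headD "")
    let short_upper := PySem.Str.upper short
    let lines := (PySem.Str.split? md_content "\n").getD []
    let start_idx := pvFindA1 short_upper lines
    let start_idx := match start_idx with
      | some i => some i
      | none => pvFindA2 vendor_name lines
    match start_idx with
    | none => ""
    | some s => PySem.Str.join "\n" (pvCollectA [] (lines.drop s))

-- ===== PORT B =====
def pvIsBoundary (l : String) : Bool :=
  PySem.Str.startswith l "### Vendor" || PySem.Str.startswith l "## "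

-- B's single enumerate pass: carries both first-match candidates and the boundary-index list
def pvScanB (p1 : String → Bool) (p2 : Option (String → Bool)) :
    Nat → Option Nat → Option Nat → List Nat → List String → Option Nat × Option Nat × List Nat
  | _, prim, fb, bs, [] => (prim, fb, bs)
  | i, prim, fb, bs, l :: rest =>
    let prim' := if prim.isNone && p1 l then some i else prim
    let fb' := match p2 with
      | some p => if fb.isNone && p l then some i else fb
      | none => fb
    let bs' := if pvIsBoundary l then bs ++ [i] else bs
    pvScanB p1 p2 (i+1) prim' fb' bs' rest

-- B's end-picking loop over the precomputed boundary list
def pvFirstGE (t : Nat) (dflt : Nat) : List Nat → Nat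
  | [] => dflt
  | b :: rest => if t ≤ b then b else pvFirstGE t dflt rest

def find_vendor_block_alt (md_content : String) (vendor_name : String) : String :=
  if md_content == "" then ""
  else
    let short_upper := PySem.Str.upper (PySem.Str.strip (((PySem.Str.split? (PySem.Str.replace (PySem.Str.replace vendor_name " (India Agent)" "") " INDIA" "") "(").getD []).headD ""))
    let parts := PySem.Str.split₀ (PySem.Str.upper vendor_name)
    let first_word : Option String := if 2 ≤ parts.length then some (parts.headD "") else none
    let lines := (PySem.Str.split? md_content "\n").getD []
    let p1 := fun l => PySem.Str.startswith l "###" && PySem.Str.isIn short_upper (PySem.Str.upper l)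
    let p2 := first_word.map (fun w l => PySem.Str.startswith l "#" && PySem.Str.isIn w (PySem.Str.upper l))
    let res := pvScanB p1 p2 0 none none [] lines
    let start := match res.1 with
      | some i => some i
      | none => res.2.1
    match start with
    | none => ""
    | some s =>
      let e := pvFirstGE (s + 3) lines.length res.2.2
      PySem.Str.join "\n" ((lines.take e).drop s)

-- ===== PRECONDITION & SPEC =====
def Spec_find_vendor_block (md_content : String) (vendor_name : String) (out : String) : Prop := out = find_vendor_block_alt md_content vendor_name
instance (md_content : String) (vendor_name : String) (out : String) : Decidable (Spec_find_vendor_block md_content vendor_name out) := by unfold Spec_find_vendor_block; infer_instance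

-- ===== CLAIM (what is proved, stated in full; the proofs are below) =====
def Claim_equal_find_vendor_block : Prop := ∀ (md_content : String) (vendor_name : String), Dom_find_vendor_block md_content vendor_name → Spec_find_vendor_block md_content vendor_name (find_vendor_block md_content vendor_name)

-- ===== LEMMAS AND PROOFS =====

theorem pvFindA1_eq (su : String) (ls : List String) :
    pvFindA1 su ls = ls.findIdx? (fun l => PySem.Str.isIn su (PySem.Str.upper l) && PySem.Str.startswith l "###") := by
  induction ls with
  | nil => rfl
  | cons l rest ih => simp [pvFindA1, List.findIdx?_cons, ih]

theorem pvFindA2_eq (vn : String) (ls : List String) :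
    pvFindA2 vn ls =
      (if 2 ≤ (PySem.Str.split₀ (PySem.Str.upper vn)).length then
        ls.findIdx? (fun l => PySem.Str.isIn ((PySem.Str.split₀ (PySem.Str.upper vn)).headD "") (PySem.Str.upper l) && PySem.Str.startswith l "#")
      else none) := by
  induction ls with
  | nil => simp [pvFindA2]
  | cons l rest ih =>
    by_cases h : 2 ≤ (PySem.Str.split₀ (PySem.Str.upper vn)).length <;>
      simp [pvFindA2, List.findIdx?_cons, ih, h]

theorem pvCollectA_ge (t : List String) (acc : List String) (h : 3 ≤ acc.length) :
    pvCollectA acc t = acc ++ (match t.findIdx? pvIsBoundary with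
      | some k => t.take k
      | none => t) := by
  induction t generalizing acc with
  | nil => simp [pvCollectA]
  | cons l rest ih =>
    have hne : acc.isEmpty = false := by
      cases acc with
      | nil => simp at h
      | cons a b => rfl
    have hstep : pvCollectA acc (l :: rest) =
        if !acc.isEmpty && PySem.Str.startswith l "### Vendor" && decide (2 < acc.length) then acc
        else if !acc.isEmpty && PySem.Str.startswith l "## " && decide (2 < acc.length) then acc
        else pvCollectA (acc ++ [l]) rest := rfl
    rw [hstep, List.findIdx?_cons]
    cases hv : PySem.Str.startswith l "### Vendor" with
    | true =>
      have hbnd : pvIsBoundary l = true := by unfold pvIsBoundary; rw [hv]; rfl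
      rw [if_pos (by rw [hne]; simp; omega)]
      simp [hbnd]
    | false =>
      cases hh : PySem.Str.startswith l "## " with
      | true =>
        have hbnd : pvIsBoundary l = true := by unfold pvIsBoundary; rw [hv, hh]; rfl
        rw [if_neg (by simp), if_pos (by rw [hne]; simp; omega)]
        simp [hbnd]
      | false =>
        have hbnd : pvIsBoundary l = false := by unfold pvIsBoundary; rw [hv, hh]; rfl
        rw [if_neg (by simp), if_neg (by simp)]
        rw [ih (acc ++ [l]) (by simp; omega)]
        rw [hbnd]
        cases hfi : rest.findIdx? pvIsBoundary with
        | none => simp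
        | some k => simp [List.take_succ_cons]

-- main block lemma: A's collection loop from empty acc equals a take of the tail
theorem pvCollect_eq_take (t : List String) :
    pvCollectA [] t = t.take (match (t.drop 3).findIdx? pvIsBoundary with
      | some k => 3 + k
      | none => t.length) := by
  match t with
  | [] => rfl
  | [a] => simp [pvCollectA]
  | [a, b] => simp [pvCollectA]
  | a :: b :: c :: rest =>
    have h0 : pvCollectA [] (a :: b :: c :: rest) = pvCollectA [a, b, c] rest := by
      simp [pvCollectA]
    rw [h0, pvCollectA_ge rest [a, b, c] (by simp)]
    cases hfi : rest.findIdx? pvIsBoundary with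
    | none => simp [hfi]
    | some k => simp [hfi, List.take_succ_cons, Nat.add_comm 3 k]

-- pvScanB invariants ------------------------------------------------------

theorem pvScanB_prim_some (p1 : String → Bool) (p2 : Option (String → Bool)) (v : Nat)
    (i : Nat) (fb : Option Nat) (bs : List Nat) (ls : List String) :
    (pvScanB p1 p2 i (some v) fb bs ls).1 = some v := by
  induction ls generalizing i fb bs with
  | nil => rfl
  | cons l rest ih => simp [pvScanB, ih]

theorem pvScanB_prim_none (p1 : String → Bool) (p2 : Option (String → Bool))
    (i : Nat) (fb : Option Nat) (bs : List Nat) (ls : List String) :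
    (pvScanB p1 p2 i none fb bs ls).1 = (ls.findIdx? p1).map (· + i) := by
  induction ls generalizing i fb bs with
  | nil => rfl
  | cons l rest ih =>
    cases h1 : p1 l with
    | true => simp [pvScanB, h1, List.findIdx?_cons, pvScanB_prim_some]
    | false =>
      simp only [pvScanB, h1, List.findIdx?_cons, Bool.and_false,
        if_neg (by simp : ¬ (false = true)), ih]
      cases rest.findIdx? p1 <;> simp <;> omega

theorem pvScanB_fb_some (p1 : String → Bool) (p : String → Bool) (v : Nat)
    (i : Nat) (prim : Option Nat) (bs : List Nat) (ls : List String) :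
    (pvScanB p1 (some p) i prim (some v) bs ls).2.1 = some v := by
  induction ls generalizing i prim bs with
  | nil => rfl
  | cons l rest ih => simp [pvScanB, ih]

theorem pvScanB_fb_none (p1 : String → Bool) (p : String → Bool)
    (i : Nat) (prim : Option Nat) (bs : List Nat) (ls : List String) :
    (pvScanB p1 (some p) i prim none bs ls).2.1 = (ls.findIdx? p).map (· + i) := by
  induction ls generalizing i prim bs with
  | nil => rfl
  | cons l rest ih =>
    cases h1 : p l with
    | true => simp [pvScanB, h1, List.findIdx?_cons, pvScanB_fb_some]
    | false =>
      simp only [pvScanB, h1, List.findIdx?_cons, Bool.and_false,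
        if_neg (by simp : ¬ (false = true)), ih]
      cases rest.findIdx? p <;> simp <;> omega

theorem pvScanB_fb_nop (p1 : String → Bool)
    (i : Nat) (prim fb : Option Nat) (bs : List Nat) (ls : List String) :
    (pvScanB p1 none i prim fb bs ls).2.1 = fb := by
  induction ls generalizing i prim bs with
  | nil => rfl
  | cons l rest ih => simp [pvScanB, ih]

-- the indices of boundary lines, starting from i
def pvBoundIdxs : Nat → List String → List Nat
  | _, [] => []
  | i, l :: rest => (if pvIsBoundary l then [i] else []) ++ pvBoundIdxs (i+1) rest

theorem pvScanB_bounds (p1 : String → Bool) (p2 : Option (String → Bool))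
    (i : Nat) (prim fb : Option Nat) (bs : List Nat) (ls : List String) :
    (pvScanB p1 p2 i prim fb bs ls).2.2 = bs ++ pvBoundIdxs i ls := by
  induction ls generalizing i prim fb bs with
  | nil => simp [pvScanB, pvBoundIdxs]
  | cons l rest ih =>
    cases hb : pvIsBoundary l <;> simp [pvScanB, pvBoundIdxs, hb, ih]

theorem pvBoundIdxs_mem_lt (i : Nat) (ls : List String) :
    ∀ b ∈ pvBoundIdxs i ls, b < i + ls.length := by
  induction ls generalizing i with
  | nil => simp [pvBoundIdxs]
  | cons l rest ih =>
    intro b hb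
    simp only [pvBoundIdxs, List.mem_append] at hb
    rcases hb with hb | hb
    · rcases Bool.eq_false_or_eq_true (pvIsBoundary l) with h | h <;> simp [h] at hb
      simp [hb]
    · have := ih (i+1) b hb
      simp only [List.length_cons]; omega

theorem pvBoundIdxs_append (i : Nat) (xs ys : List String) :
    pvBoundIdxs i (xs ++ ys) = pvBoundIdxs i xs ++ pvBoundIdxs (i + xs.length) ys := by
  induction xs generalizing i with
  | nil => simp [pvBoundIdxs]
  | cons x xs ih =>
    simp only [List.cons_append, pvBoundIdxs, ih, List.append_assoc, List.length_cons]
    have : i + 1 + xs.length = i + (xs.length + 1) := by omega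
    rw [this]

theorem pvFirstGE_append_lt (t d : Nat) (u v : List Nat) (h : ∀ b ∈ u, b < t) :
    pvFirstGE t d (u ++ v) = pvFirstGE t d v := by
  induction u with
  | nil => rfl
  | cons b u ih =>
    have hb : b < t := h b (by simp)
    simp only [List.cons_append, pvFirstGE, if_neg (by omega : ¬ t ≤ b)]
    exact ih (fun x hx => h x (by simp [hx]))

theorem pvFirstGE_boundIdxs (t' d : Nat) (t : Nat) (ht : t' ≤ t) (ys : List String) :
    pvFirstGE t' d (pvBoundIdxs t ys) =
      (match ys.findIdx? pvIsBoundary with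
        | some k => t + k
        | none => d) := by
  induction ys generalizing t with
  | nil => rfl
  | cons y ys ih =>
    cases hb : pvIsBoundary y with
    | true =>
      simp [pvBoundIdxs, hb, pvFirstGE, ht, List.findIdx?_cons]
    | false =>
      simp only [pvBoundIdxs, hb, List.nil_append, List.findIdx?_cons,
        ih (t+1) (by omega), if_neg (by simp : ¬ (false = true))]
      cases ys.findIdx? pvIsBoundary with
      | none => rfl
      | some k =>
        show t + 1 + k = t + (k + 1)
        omega

-- B's end computation equals the first-boundary-at-or-after-t characterisation
theorem pvFirstGE_eq (t : Nat) (lines : List String) :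
    pvFirstGE t lines.length (pvBoundIdxs 0 lines) =
      (match (lines.drop t).findIdx? pvIsBoundary with
        | some k => t + k
        | none => lines.length) := by
  by_cases hle : t ≤ lines.length
  · have hlen : (lines.take t).length = t := by simp [Nat.min_eq_left hle]
    conv_lhs => rw [← List.take_append_drop t lines]
    rw [pvBoundIdxs_append, pvFirstGE_append_lt _ _ _ _ (by
      intro b hb
      have := pvBoundIdxs_mem_lt 0 (lines.take t) b hb
      omega), Nat.zero_add, hlen, List.take_append_drop,
      pvFirstGE_boundIdxs t lines.length t le_rfl]
  · have hdrop : lines.drop t = [] := List.drop_eq_nil_of_le (by omega)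
    rw [hdrop]
    have h0 : pvBoundIdxs 0 lines ++ ([] : List Nat) = pvBoundIdxs 0 lines := by simp
    rw [← h0, pvFirstGE_append_lt t lines.length (pvBoundIdxs 0 lines) [] (by
      intro b hb
      have := pvBoundIdxs_mem_lt 0 lines b hb
      omega)]
    rfl

-- ===== VERDICT (by name: the statement is the Claim_ definition above) =====
theorem find_vendor_block_spec : Claim_equal_find_vendor_block := by
  intro md vn _
  unfold Spec_find_vendor_block find_vendor_block find_vendor_block_alt
  by_cases hmd : md == ""
  · simp [hmd]
  · simp only [hmd, if_false, Bool.false_eq_true]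
    rw [pvFindA1_eq, pvFindA2_eq]
    set lines := (PySem.Str.split? md "\n").getD [] with hl
    set su := PySem.Str.upper (PySem.Str.strip (((PySem.Str.split? (PySem.Str.replace (PySem.Str.replace vn " (India Agent)" "") " INDIA" "") "(").getD []).headD "")) with hsu
    set parts := PySem.Str.split₀ (PySem.Str.upper vn) with hparts
    have hp1 : (fun l => PySem.Str.startswith l "###" && PySem.Str.isIn su (PySem.Str.upper l))
        = (fun l => PySem.Str.isIn su (PySem.Str.upper l) && PySem.Str.startswith l "###") := by
      funext l; exact Bool.and_comm _ _
    have hp2 : (fun l => PySem.Str.startswith l "#" && PySem.Str.isIn (parts.headD "") (PySem.Str.upper l))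
        = (fun l => PySem.Str.isIn (parts.headD "") (PySem.Str.upper l) && PySem.Str.startswith l "#") := by
      funext l; exact Bool.and_comm _ _
    have key : ∀ s : Nat,
        PySem.Str.join "\n" (pvCollectA [] (lines.drop s)) =
        PySem.Str.join "\n" ((lines.take (match (lines.drop (s + 3)).findIdx? pvIsBoundary with
          | some k => s + 3 + k
          | none => lines.length)).drop s) := by
      intro s
      rw [pvCollect_eq_take]
      have hdd : lines.drop (s + 3) = (lines.drop s).drop 3 := by
        rw [List.drop_drop]
      rw [hdd]
      congr 1
      cases hfi : ((lines.drop s).drop 3).findIdx? pvIsBoundary with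
      | some k =>
        simp only [List.drop_take]
        congr 1
        all_goals omega
      | none =>
        simp
    -- rewrite B's fold results
    simp only [pvScanB_bounds, pvScanB_prim_none, List.nil_append, hp1, hp2, pvFirstGE_eq]
    by_cases hlen : 2 ≤ parts.length
    · simp only [hlen, if_true, Option.map_some, pvScanB_fb_none, hp2]
      cases hs1 : lines.findIdx? (fun l => PySem.Str.isIn su (PySem.Str.upper l) && PySem.Str.startswith l "###") with
      | some s =>
        simp only [Option.map_some, Nat.add_zero]
        exact key s
      | none =>
        simp only [Option.map_none, hlen, if_true]
        cases hs2 : lines.findIdx? (fun l => PySem.Str.isIn (parts.headD "") (PySem.Str.upper l) && PySem.Str.startswith l "#") with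
        | some s =>
          simp only [Option.map_some, Nat.add_zero]
          exact key s
        | none => rfl
    · simp only [hlen, if_false, Option.map_none, pvScanB_fb_nop]
      cases hs1 : lines.findIdx? (fun l => PySem.Str.isIn su (PySem.Str.upper l) && PySem.Str.startswith l "###") with
      | some s =>
        simp only [Option.map_some, Nat.add_zero]
        exact key s
      | none => rfl
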